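-- pv_equiv track=rewrite | github.com/Koon-Kiat/Spam-And-Phishing-Detection-Using-Machine-Learning | Evaluation.py | detect_url_shorteners
-- ===== SOURCE A (Python) =====
-- from typing import Optional, List, Dict, Union, Tuple
--
-- def detect_url_shorteners(links: List[str]) -> int:
--     shortener_domains = [
--         'bit.ly', 'tinyurl.com', 'goo.gl', 'ow.ly', 't.co', 'is.gd', 'buff.ly',
--         'adf.ly', 'bl.ink', 'lnkd.in', 'shorte.st', 'mcaf.ee', 'q.gs', 'po.st',
--         'bc.vc', 's.coop', 'u.to', 'cutt.ly', 't2mio.com', 'rb.gy', 'clck.ru',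
--         'shorturl.at', '1url.com', 'hyperurl.co', 'urlzs.com', 'v.gd', 'x.co'
--     ]
--     short_urls = [link for link in links if any(domain in link for domain in shortener_domains)]
--     return len(short_urls)
-- ===== SOURCE B (Python) =====
-- # Dot-anchored multi-pattern matching: every shortener domain contains exactly one
-- # '.', so a domain occurs in a link iff at some '.' in the link the characters
-- # immediately before and after the dot equal the domain's two halves.  Instead of
-- # scanning the whole link once per domain, we scan each link once for dots and
-- # compare the two halves around each dot.
-- _PAIRS = [
--     ('bit', 'ly'), ('tinyurl', 'com'), ('goo', 'gl'), ('ow', 'ly'), ('t', 'co'),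
--     ('is', 'gd'), ('buff', 'ly'), ('adf', 'ly'), ('bl', 'ink'), ('lnkd', 'in'),
--     ('shorte', 'st'), ('mcaf', 'ee'), ('q', 'gs'), ('po', 'st'), ('bc', 'vc'),
--     ('s', 'coop'), ('u', 'to'), ('cutt', 'ly'), ('t2mio', 'com'), ('rb', 'gy'),
--     ('clck', 'ru'), ('shorturl', 'at'), ('1url', 'com'), ('hyperurl', 'co'),
--     ('urlzs', 'com'), ('v', 'gd'), ('x', 'co'),
-- ]
--
--
-- def detect_url_shorteners(links):
--     count = 0
--     for link in links:
--         for i, ch in enumerate(link):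
--             if ch == '.' and any(
--                 len(b) <= i
--                 and link[i - len(b):i] == b
--                 and link[i + 1:i + 1 + len(a)] == a
--                 for b, a in _PAIRS
--             ):
--                 count += 1
--                 break
--     return count
-- ===== Notes on version B (the rewrite author's own statement) =====
-- stated objective: alternative
-- what changed: Instead of testing each link against all 27 whole domains with substring scans, B splits each domain at its dot once and scans each link for '.' characters, comparing only the halves before and after each dot (correct because every shortener domain contains exactly one dot); counting uses a running accumulator instead of building a filtered list.
import Mathlib
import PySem

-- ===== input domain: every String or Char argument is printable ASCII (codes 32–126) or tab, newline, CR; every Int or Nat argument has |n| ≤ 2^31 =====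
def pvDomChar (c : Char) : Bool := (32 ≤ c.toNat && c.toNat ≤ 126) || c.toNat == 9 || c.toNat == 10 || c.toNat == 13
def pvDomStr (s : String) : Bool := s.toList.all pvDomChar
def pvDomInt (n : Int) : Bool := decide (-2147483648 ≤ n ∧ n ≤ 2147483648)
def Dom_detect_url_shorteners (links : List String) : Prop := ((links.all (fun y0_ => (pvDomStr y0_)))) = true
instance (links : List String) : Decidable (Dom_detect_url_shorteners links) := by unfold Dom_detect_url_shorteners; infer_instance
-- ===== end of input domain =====

-- B replaces A's per-link scan over all 27 whole-domain substring tests by dot-anchored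
-- matching: each link is scanned once for '.' characters and only the two halves around
-- each dot are compared against the split domains (alternative decomposition; correct
-- because every shortener domain contains exactly one '.').

-- ===== PORT A =====
def pvShortenerDomains : List String := ["bit.ly", "tinyurl.com", "goo.gl", "ow.ly", "t.co", "is.gd", "buff.ly", "adf.ly", "bl.ink", "lnkd.in", "shorte.st", "mcaf.ee", "q.gs", "po.st", "bc.vc", "s.coop", "u.to", "cutt.ly", "t2mio.com", "rb.gy", "clck.ru", "shorturl.at", "1url.com", "hyperurl.co", "urlzs.com", "v.gd", "x.co"]

def detect_url_shorteners (links : List String) : Int :=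
  ((links.filter (fun link => pvShortenerDomains.any (fun d => PySem.Str.isIn d link))).length : Int)

-- ===== PORT B =====
-- Source B's _PAIRS: each domain split at its dot into (before, after)
def pvPairs : List (List Char × List Char) := [("bit".toList, "ly".toList), ("tinyurl".toList, "com".toList), ("goo".toList, "gl".toList), ("ow".toList, "ly".toList), ("t".toList, "co".toList), ("is".toList, "gd".toList), ("buff".toList, "ly".toList), ("adf".toList, "ly".toList), ("bl".toList, "ink".toList), ("lnkd".toList, "in".toList), ("shorte".toList, "st".toList), ("mcaf".toList, "ee".toList), ("q".toList, "gs".toList), ("po".toList, "st".toList), ("bc".toList, "vc".toList), ("s".toList, "coop".toList), ("u".toList, "to".toList), ("cutt".toList, "ly".toList), ("t2mio".toList, "com".toList), ("rb".toList, "gy".toList), ("clck".toList, "ru".toList), ("shorturl".toList, "at".toList), ("1url".toList, "com".toList), ("hyperurl".toList, "co".toList), ("urlzs".toList, "com".toList), ("v".toList, "gd".toList), ("x".toList, "co".toList)]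

-- the any(... for b, a in _PAIRS) test at dot position i (slices ported with PySem.List.slice)
def pvDotHit (s : List Char) (i : Int) : Bool :=
  pvPairs.any (fun ba =>
    decide ((ba.1.length : Int) ≤ i)
      && (PySem.List.slice s (some (i - ba.1.length)) (some i) == ba.1)
      && (PySem.List.slice s (some (i + 1)) (some (i + 1 + ba.2.length)) == ba.2))

-- the `for i, ch in enumerate(link)` loop with its break: true iff some iteration counts
def pvLinkHit (s : List Char) : Bool :=
  (PySem.List.enumerate s 0).any (fun ic => (ic.2 == '.') && pvDotHit s ic.1)

def detect_url_shorteners_alt (links : List String) : Int :=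
  links.foldl (fun count link => if pvLinkHit link.toList then count + 1 else count) 0

-- ===== PRECONDITION & SPEC =====
def Spec_detect_url_shorteners (links : List String) (out : Int) : Prop := out = detect_url_shorteners_alt links
instance (links : List String) (out : Int) : Decidable (Spec_detect_url_shorteners links out) := by unfold Spec_detect_url_shorteners; infer_instance

-- ===== CLAIM (what is proved, stated in full; the proofs are below) =====
def Claim_equal_detect_url_shorteners : Prop := ∀ (links : List String), Dom_detect_url_shorteners links → Spec_detect_url_shorteners links (detect_url_shorteners links)

-- ===== LEMMAS AND PROOFS =====

-- a pattern with one '.' occurs in s iff at some '.' of s both halves match around it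
theorem pv_dot_anchor (b a s : List Char) :
    PySem.Chars.isIn (b ++ '.' :: a) s = true ↔
      ∃ i : Nat, i < s.length ∧ s[i]? = some '.' ∧ b.length ≤ i ∧
        (s.drop (i - b.length)).take b.length = b ∧ (s.drop (i + 1)).take a.length = a := by
  rw [← PySem.Chars.exists_prefix_drop_iff_isIn]
  constructor
  · rintro ⟨j, t, ht⟩
    have ht' : s.drop j = b ++ '.' :: (a ++ t) := by
      rw [← ht]; simp
    have hlen : b.length + (1 + (a.length + t.length)) = s.length - j := by
      have := congrArg List.length ht'
      simp at this; omega
    have hjs : j ≤ s.length := by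
      by_contra h
      have : s.drop j = [] := List.drop_eq_nil_of_le (by omega)
      rw [this] at ht'; simp at ht'
    refine ⟨j + b.length, by omega, ?_, by omega, ?_, ?_⟩
    · rw [← List.getElem?_drop, ht']
      simp
    · have : j + b.length - b.length = j := by omega
      rw [this, ht']
      simp
    · have hd : s.drop (j + b.length + 1) = a ++ t := by
        have : s.drop (j + b.length + 1) = (s.drop j).drop (b.length + 1) := by
          rw [List.drop_drop]; ring_nf
        rw [this, ht']
        simp
      rw [hd]
      simp
  · rintro ⟨i, hi, hdot, hble, htb, hta⟩
    have hdrop_i : s.drop (i - b.length) = b ++ s.drop i := by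
      conv_lhs => rw [← List.take_append_drop b.length (s.drop (i - b.length))]
      rw [htb, List.drop_drop]
      congr 2
      omega
    have hgi : s[i]'hi = '.' := by
      have := List.getElem?_eq_getElem hi
      rw [hdot] at this
      exact (Option.some_injective _ this.symm)
    have hdot_cons : s.drop i = '.' :: s.drop (i + 1) := by
      rw [List.drop_eq_getElem_cons hi, hgi]
    have hpa : a <+: s.drop (i + 1) := by
      rw [List.prefix_iff_eq_take, hta]
    obtain ⟨t, htt⟩ := hpa
    refine ⟨i - b.length, t, ?_⟩
    rw [hdrop_i, hdot_cons, ← htt]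
    simp
theorem pv_dotHit_natCast (s : List Char) (k : Nat) :
    pvDotHit s (k : Int)
      = pvPairs.any (fun ba => decide (ba.1.length ≤ k)
          && ((s.drop (k - ba.1.length)).take ba.1.length == ba.1)
          && ((s.drop (k + 1)).take ba.2.length == ba.2)) := by
  unfold pvDotHit
  congr 1
  funext ba
  by_cases h : ba.1.length ≤ k
  · have h1 : (k : Int) - ba.1.length = ((k - ba.1.length : Nat) : Int) := by omega
    have h3 : (k : Int) + 1 = ((k + 1 : Nat) : Int) := by omega
    have h4 : (k : Int) + 1 + ba.2.length = ((k + 1 + ba.2.length : Nat) : Int) := by omega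
    rw [h1, h4, h3, PySem.List.slice_natCast, PySem.List.slice_natCast]
    have e1 : k - (k - ba.1.length) = ba.1.length := by omega
    have e2 : k + 1 + ba.2.length - (k + 1) = ba.2.length := by omega
    rw [e1, e2]
    have hg : decide ((ba.1.length : Int) ≤ (k : Int)) = decide (ba.1.length ≤ k) := by
      simp
    rw [hg]
  · have hg1 : decide ((ba.1.length : Int) ≤ (k : Int)) = false := by
      simp; exact_mod_cast lt_of_not_ge h
    have hg2 : decide (ba.1.length ≤ k) = false := by simp [h]
    rw [hg1, hg2]
    simp

theorem pv_linkHit_iff (s : List Char) :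
    pvLinkHit s = true ↔
      ∃ ba ∈ pvPairs, ∃ i : Nat, i < s.length ∧ s[i]? = some '.' ∧ ba.1.length ≤ i ∧
        (s.drop (i - ba.1.length)).take ba.1.length = ba.1 ∧
        (s.drop (i + 1)).take ba.2.length = ba.2 := by
  unfold pvLinkHit
  rw [List.any_eq_true]
  constructor
  · rintro ⟨ic, hmem, hic⟩
    obtain ⟨k, hk, rfl⟩ := (PySem.List.mem_enumerate_iff _ _ _).1 hmem
    simp only [Bool.and_eq_true, beq_iff_eq] at hic
    obtain ⟨hdot, hhit⟩ := hic
    rw [show ((0 : Int) + (k : Int)) = (k : Int) by ring, pv_dotHit_natCast,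
        List.any_eq_true] at hhit
    obtain ⟨ba, hba, hcond⟩ := hhit
    simp only [Bool.and_eq_true, beq_iff_eq, decide_eq_true_eq] at hcond
    exact ⟨ba, hba, k, hk, by simp [List.getElem?_eq_getElem hk, hdot], hcond.1.1, hcond.1.2,
      hcond.2⟩
  · rintro ⟨ba, hba, i, hi, hdot, hble, htb, hta⟩
    refine ⟨((0 : Int) + (i : Int), s[i]'hi), (PySem.List.mem_enumerate_iff _ _ _).2 ⟨i, hi, rfl⟩, ?_⟩
    have hgi : s[i]'hi = '.' := by
      have := List.getElem?_eq_getElem hi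
      rw [hdot] at this
      exact (Option.some_injective _ this.symm)
    simp only [Bool.and_eq_true, beq_iff_eq]
    refine ⟨hgi, ?_⟩
    rw [show ((0 : Int) + (i : Int)) = (i : Int) by ring, pv_dotHit_natCast, List.any_eq_true]
    exact ⟨ba, hba, by simp [hble, htb, hta]⟩

-- the 27 domains are exactly the pairs rejoined around their dot
theorem pv_domains_eq_pairs :
    pvShortenerDomains.map String.toList = pvPairs.map (fun ba => ba.1 ++ '.' :: ba.2) := by
  decide

theorem pv_link_eq (s : List Char) :
    pvShortenerDomains.any (fun d => PySem.Chars.isIn d.toList s) = pvLinkHit s := by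
  have h : pvShortenerDomains.any (fun d => PySem.Chars.isIn d.toList s)
      = pvPairs.any (fun ba => PySem.Chars.isIn (ba.1 ++ '.' :: ba.2) s) := by
    have h2 : (pvShortenerDomains.map String.toList).any (fun l => PySem.Chars.isIn l s)
        = (pvPairs.map (fun ba => ba.1 ++ '.' :: ba.2)).any (fun l => PySem.Chars.isIn l s) := by
      rw [pv_domains_eq_pairs]
    rw [List.any_map, List.any_map] at h2
    simpa [Function.comp] using h2
  rw [h]
  rcases hB : pvLinkHit s with _ | _
  · rw [Bool.eq_false_iff]
    intro hA
    rw [List.any_eq_true] at hA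
    obtain ⟨ba, hba, hin⟩ := hA
    have := (pv_dot_anchor ba.1 ba.2 s).1 hin
    exact absurd ((pv_linkHit_iff s).2 ⟨ba, hba, this⟩) (by simp [hB])
  · rw [List.any_eq_true]
    obtain ⟨ba, hba, hcond⟩ := (pv_linkHit_iff s).1 hB
    exact ⟨ba, hba, (pv_dot_anchor ba.1 ba.2 s).2 hcond⟩

-- ===== VERDICT (by name: the statement is the Claim_ definition above) =====
theorem detect_url_shorteners_spec : Claim_equal_detect_url_shorteners := by
  intro links _
  unfold Spec_detect_url_shorteners detect_url_shorteners detect_url_shorteners_alt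
  rw [PySem.List.foldl_if_add_one, zero_add, ← List.countP_eq_length_filter]
  have hp : (fun link : String => pvShortenerDomains.any (fun d => PySem.Str.isIn d link))
      = (fun link : String => pvLinkHit link.toList) := by
    funext link
    rw [← pv_link_eq link.toList]
    simp
  rw [hp]
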